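-- pv_equiv track=rewrite | github.com/Ic4r0/advent_of_code2016 | days/day_7.py | part_1
-- ===== SOURCE A (Python) =====
-- def check_abba(ip: str) -> bool:
--     """ Util to check if IP part is ABBA
--
--     :param ip: IP part to check for ABBA
--     :return: is ABBA
--     """
--     if len(ip) < 4:
--         return False
--     for idx in range(len(ip) - 3):
--         if ip[idx] != ip[idx+1] and f'{ip[idx:idx+2]}' == f'{ip[idx+3]}{ip[idx+2]}':
--             return True
--     return False
--
-- def differentiate_ip_parts(ip: str) -> tuple:
--     """ Util to split IP in different type of parts
--
--     :param ip: IP to be split in different type of parts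
--     :return: separated IP parts
--     """
--     supernet = []
--     hypernet = []
--     if '[' in ip:
--         idx_open_bracket = ip.index('[')
--         idx_close_bracket = ip.index(']')
--         supernet.append(ip[:idx_open_bracket])
--         hypernet.append(ip[idx_open_bracket+1: idx_close_bracket])
--         sup, hyp = differentiate_ip_parts(ip[idx_close_bracket+1:])
--         supernet.extend(sup)
--         hypernet.extend(hyp)
--     else:
--         supernet = [ip]
--     return supernet, hypernet
--
-- def part_1(ip_list: list) -> int:
--     """ Code for the 1st part of the 7th day of Advent of Code
--
--     :param ip_list: input list
--     :return: numeric result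
--     """
--     valid_ip = 0
--     for ip in ip_list:
--         sup, hyp = differentiate_ip_parts(ip)
--         if any([check_abba(single_sup) for single_sup in sup]) \
--                 and all([not check_abba(single_hyp) for single_hyp in hyp]):
--             valid_ip += 1
--     return valid_ip
-- ===== SOURCE B (Python) =====
-- def _tokens(s):
--     """Single left-to-right pass: split s into supernet/hypernet tokens with an inside-bracket flag."""
--     sup, hyp, buf = [], [], []
--     inside = False
--     for ch in s:
--         if ch == '[' and not inside:
--             sup.append(''.join(buf)); buf = []; inside = True
--         elif ch == ']' and inside:
--             hyp.append(''.join(buf)); buf = []; inside = False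
--         else:
--             buf.append(ch)
--     (hyp if inside else sup).append(''.join(buf))
--     return sup, hyp
--
-- def _abba(s):
--     return any(a == d and b == c and a != b
--                for a, b, c, d in zip(s, s[1:], s[2:], s[3:]))
--
-- def part_1(ip_list: list) -> int:
--     return sum(1 for ip in ip_list
--                if (lambda t: any(map(_abba, t[0])) and not any(map(_abba, t[1])))(_tokens(ip)))
-- ===== Notes on version B (the rewrite author's own statement) =====
-- stated objective: idiomatic
-- what changed: differentiate_ip_parts's bracket-by-bracket recursion with str.index and slicing is replaced by a single left-to-right scan with an inside-bracket flag ('[' opens only when outside, ']' closes only when inside), and the indexed ABBA loop by an any() over zipped 4-windows; counting becomes a sum over a generator. Pre_ excludes exactly the inputs on which A raises (a string with a '[' not followed by any later ']'); on every input A returns on, B returns the same value.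
import Mathlib
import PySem

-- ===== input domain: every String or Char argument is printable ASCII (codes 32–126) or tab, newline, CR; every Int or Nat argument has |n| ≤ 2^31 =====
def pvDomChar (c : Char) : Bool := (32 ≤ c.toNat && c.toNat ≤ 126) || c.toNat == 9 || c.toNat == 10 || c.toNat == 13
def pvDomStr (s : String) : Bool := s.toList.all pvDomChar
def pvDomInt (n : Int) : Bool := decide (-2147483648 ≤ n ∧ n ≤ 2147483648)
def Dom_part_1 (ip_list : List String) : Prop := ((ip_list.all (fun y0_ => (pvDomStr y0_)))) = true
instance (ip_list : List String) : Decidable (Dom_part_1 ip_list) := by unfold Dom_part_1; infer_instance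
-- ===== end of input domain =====

-- B replaces A's bracket-by-bracket recursion by a single scan with an inside-bracket flag (idiomatic, same cost);
-- equivalence is proved on every input where A returns (Pre_ excludes exactly the inputs where A raises ValueError).

-- ===== PORT A =====
-- check_abba on the character list; indexing idx..idx+3 is in range (idx ≤ len-4), so getD is exact here;
-- ip[idx:idx+2] is the in-range slice (drop/take), exact for these nonnegative bounds.
def abbaCondA (cs : List Char) (idx : Nat) : Bool :=
  cs.getD idx ' ' != cs.getD (idx+1) ' ' &&
    ((cs.drop idx).take 2 == [cs.getD (idx+3) ' ', cs.getD (idx+2) ' '])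

def check_abbaA (cs : List Char) : Bool :=
  if cs.length < 4 then false
  else (List.range (cs.length - 3)).any (abbaCondA cs)

-- differentiate_ip_parts; `none` = the ValueError of ip.index(']') when '[' is present but ']' is not.
def diffA (cs : List Char) : Option (List (List Char) × List (List Char)) :=
  match hi : cs.findIdx? (· == '[') with
  | none => some ([cs], [])
  | some i =>
    match cs.findIdx? (· == ']') with
    | none => none
    | some j =>
      (diffA (cs.drop (j+1))).map
        (fun sh => (cs.take i :: sh.1, ((cs.drop (i+1)).take (j - (i+1))) :: sh.2))
termination_by cs.length
decreasing_by
  cases cs with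
  | nil => simp at hi
  | cons a t => simp [List.length_drop]

def part_1 (ip_list : List String) : Int :=
  ip_list.foldl (fun acc ip =>
    match diffA ip.toList with
    | none => acc   -- Python raises ValueError here; excluded by Pre_
    | some sh =>
      if sh.1.any check_abbaA && sh.2.all (fun h => !check_abbaA h) then acc + 1 else acc) 0

-- ===== PORT B =====
-- _abba: any() over zip(s, s[1:], s[2:], s[3:]) = recursion over 4-windows
def abbaB : List Char → Bool
  | a :: b :: c :: d :: rest => (a == d && b == c && !(a == b)) || abbaB (b :: c :: d :: rest)
  | _ => false

-- one step of _tokens' scan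
def stepB (st : List (List Char) × List (List Char) × List Char × Bool) (c : Char) :
    List (List Char) × List (List Char) × List Char × Bool :=
  if c == '[' && !st.2.2.2 then (st.1 ++ [st.2.2.1], st.2.1, [], true)
  else if c == ']' && st.2.2.2 then (st.1, st.2.1 ++ [st.2.2.1], [], false)
  else (st.1, st.2.1, st.2.2.1 ++ [c], st.2.2.2)

def tokensB (cs : List Char) : List (List Char) × List (List Char) :=
  let r := cs.foldl stepB ([], [], [], false)
  if r.2.2.2 then (r.1, r.2.1 ++ [r.2.2.1]) else (r.1 ++ [r.2.2.1], r.2.1)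

def validB (ip : String) : Bool :=
  let t := tokensB ip.toList
  t.1.any abbaB && !(t.2.any abbaB)

def part_1_alt (ip_list : List String) : Int :=
  ((ip_list.countP validB : Nat) : Int)

-- ===== PRECONDITION & SPEC =====
-- domOk cs: every '[' in cs has some ']' after it — exactly the strings on which A's
-- recursion terminates without ip.index(']') raising ValueError.
def domOk : List Char → Bool
  | [] => true
  | c :: r => (!(c == '[') || r.contains ']') && domOk r

-- Pre_ excludes exactly the inputs on which the Python A raises ValueError: lists containing a
-- string with a '[' not followed by any later ']'.
def Pre_part_1 (ip_list : List String) : Prop :=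
  (ip_list.all (fun ip => domOk ip.toList)) = true
instance (ip_list : List String) : Decidable (Pre_part_1 ip_list) := by unfold Pre_part_1; infer_instance

def pvWitness_part_1 : List String := ["abba[mnop]qrst", "ioxxoj[asdfgh]zxcvbn"]

def Spec_part_1 (ip_list : List String) (out : Int) : Prop := out = part_1_alt ip_list
instance (ip_list : List String) (out : Int) : Decidable (Spec_part_1 ip_list out) := by unfold Spec_part_1; infer_instance

-- ===== CLAIM (what is proved, stated in full; the proofs are below) =====
def Claim_equal_part_1 : Prop := ∀ (ip_list : List String), Dom_part_1 ip_list → Pre_part_1 ip_list → Spec_part_1 ip_list (part_1 ip_list)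

-- ===== LEMMAS AND PROOFS =====

theorem abbaA_range (t : List Char) :
    check_abbaA t = (List.range (t.length - 3)).any (abbaCondA t) := by
  unfold check_abbaA
  split
  · rename_i h
    have h0 : t.length - 3 = 0 := by omega
    simp [h0]
  · rfl

theorem abbaCondA_shift (a : Char) (t : List Char) (i : Nat) :
    abbaCondA (a :: t) (i+1) = abbaCondA t i := by
  simp [abbaCondA]

theorem abba_eq : ∀ cs : List Char, check_abbaA cs = abbaB cs := by
  intro cs
  induction cs with
  | nil => rfl
  | cons a t ih =>
    rcases t with _ | ⟨b, _ | ⟨c, _ | ⟨d, r⟩⟩⟩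
    · rfl
    · rfl
    · rfl
    · have hlen : (a :: b :: c :: d :: r).length - 3 = ((b :: c :: d :: r).length - 3) + 1 := by
        simp
      rw [abbaA_range, hlen, List.range_succ_eq_map, List.any_cons, List.any_map]
      have hshift : ((abbaCondA (a :: b :: c :: d :: r)) ∘ Nat.succ) = abbaCondA (b :: c :: d :: r) := by
        funext i; exact abbaCondA_shift a _ i
      rw [hshift, ← abbaA_range, ih]
      show (abbaCondA (a :: b :: c :: d :: r) 0 || abbaB (b :: c :: d :: r)) = _
      have h0 : abbaCondA (a :: b :: c :: d :: r) 0 = (a == d && b == c && !(a == b)) := by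
        simp [abbaCondA]
        cases hab : a == b <;> cases had : a == d <;> cases hbc : b == c <;> simp_all
      rw [h0]
      rfl

theorem abbaB_cons (c : Char) (l : List Char) (h : abbaB l = true) : abbaB (c :: l) = true := by
  rcases l with _ | ⟨a, _ | ⟨b, _ | ⟨d, _ | ⟨e, r⟩⟩⟩⟩
  · simp [abbaB] at h
  · simp [abbaB] at h
  · simp [abbaB] at h
  · simp [abbaB] at h
  · show (_ || abbaB (a :: b :: d :: e :: r)) = true
    rw [h, Bool.or_true]

theorem abbaB_drop : ∀ (k : Nat) (l : List Char), abbaB (l.drop k) = true → abbaB l = true := by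
  intro k
  induction k with
  | zero => intro l h; simpa using h
  | succ k ih =>
    intro l h
    cases l with
    | nil => simpa using h
    | cons c r =>
      rw [List.drop_succ_cons] at h
      exact abbaB_cons c r (ih r h)

theorem split_first : ∀ (l : List Char) (x : Char), x ∈ l →
    ∃ p q, l = p ++ x :: q ∧ p.all (fun c => !(c == x)) = true := by
  intro l x
  induction l with
  | nil => intro h; cases h
  | cons c r ih =>
    intro h
    by_cases hc : (c == x) = true
    · exact ⟨[], r, by simp [(beq_iff_eq).mp hc], rfl⟩
    · have hc' : (c == x) = false := eq_false_of_ne_true hc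
      rcases List.mem_cons.mp h with h1 | h1
      · exact absurd (by simp [h1]) hc
      · obtain ⟨p, q, hl, hp⟩ := ih h1
        exact ⟨c :: p, q, by simp [hl], by simp [List.all_cons, hc', hp]⟩

theorem domOk_tail (c : Char) (r : List Char) (h : domOk (c :: r) = true) : domOk r = true := by
  rw [domOk, Bool.and_eq_true] at h
  exact h.2

theorem domOk_drop : ∀ (k : Nat) (l : List Char), domOk l = true → domOk (l.drop k) = true := by
  intro k
  induction k with
  | zero => intro l h; simpa using h
  | succ k ih =>
    intro l h
    cases l with
    | nil => simpa using h
    | cons c r =>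
      rw [List.drop_succ_cons]
      exact ih r (domOk_tail c r h)

theorem domOk_decomp : ∀ l : List Char, domOk l = true →
    l.all (fun c => !(c == '[')) = true ∨
    ∃ pre mid rest, l = pre ++ '[' :: (mid ++ ']' :: rest) ∧
      pre.all (fun c => !(c == '[')) = true ∧ mid.all (fun c => !(c == ']')) = true := by
  intro l
  induction l with
  | nil => intro _; left; rfl
  | cons c r ih =>
    intro h
    have hr : domOk r = true := domOk_tail c r h
    by_cases hc : (c == '[') = true
    · have hcont : ']' ∈ r := by
        rw [domOk, Bool.and_eq_true] at h
        rcases h with ⟨h1, _⟩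
        rw [hc] at h1
        simpa using h1
      obtain ⟨mid, rest, hreq, hmid⟩ := split_first r ']' hcont
      right
      exact ⟨[], mid, rest, by simp [hreq, (beq_iff_eq).mp hc], rfl, hmid⟩
    · have hc' : (c == '[') = false := eq_false_of_ne_true hc
      rcases ih hr with hall | ⟨pre, mid, rest, hl, hpre, hmid⟩
      · left; simp [List.all_cons, hc', hall]
      · right
        exact ⟨c :: pre, mid, rest, by simp [hl], by simp [List.all_cons, hc', hpre], hmid⟩

theorem foldl_stepB_pre : ∀ (cs : List Char) (s0 h0 su hy : List (List Char)) (buf : List Char) (ins : Bool),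
    cs.foldl stepB (s0 ++ su, h0 ++ hy, buf, ins) =
      (s0 ++ (cs.foldl stepB (su, hy, buf, ins)).1,
       h0 ++ (cs.foldl stepB (su, hy, buf, ins)).2.1,
       (cs.foldl stepB (su, hy, buf, ins)).2.2.1,
       (cs.foldl stepB (su, hy, buf, ins)).2.2.2) := by
  intro cs
  induction cs with
  | nil => intro s0 h0 su hy buf ins; simp
  | cons c cs ih =>
    intro s0 h0 su hy buf ins
    rw [List.foldl_cons, List.foldl_cons]
    by_cases hc1 : (c == '[' && !ins) = true
    · rw [show stepB (s0 ++ su, h0 ++ hy, buf, ins) c = (s0 ++ (su ++ [buf]), h0 ++ hy, [], true) by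
        simp only [stepB]; rw [if_pos hc1]; simp [List.append_assoc]]
      rw [show stepB (su, hy, buf, ins) c = (su ++ [buf], hy, [], true) by
        simp only [stepB]; rw [if_pos hc1]]
      exact ih s0 h0 (su ++ [buf]) hy [] true
    · by_cases hc2 : (c == ']' && ins) = true
      · rw [show stepB (s0 ++ su, h0 ++ hy, buf, ins) c = (s0 ++ su, h0 ++ (hy ++ [buf]), [], false) by
          simp only [stepB]; rw [if_neg hc1, if_pos hc2]; simp [List.append_assoc]]
        rw [show stepB (su, hy, buf, ins) c = (su, hy ++ [buf], [], false) by
          simp only [stepB]; rw [if_neg hc1, if_pos hc2]]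
        exact ih s0 h0 su (hy ++ [buf]) [] false
      · rw [show stepB (s0 ++ su, h0 ++ hy, buf, ins) c = (s0 ++ su, h0 ++ hy, buf ++ [c], ins) by
          simp only [stepB]; rw [if_neg hc1, if_neg hc2]]
        rw [show stepB (su, hy, buf, ins) c = (su, hy, buf ++ [c], ins) by
          simp only [stepB]; rw [if_neg hc1, if_neg hc2]]
        exact ih s0 h0 su hy (buf ++ [c]) ins

theorem foldl_stepB_noOpen : ∀ (seg : List Char) (su hy : List (List Char)) (buf : List Char),
    seg.all (fun x => !(x == '[')) = true →
    seg.foldl stepB (su, hy, buf, false) = (su, hy, buf ++ seg, false) := by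
  intro seg
  induction seg with
  | nil => intro su hy buf _; simp
  | cons c seg ih =>
    intro su hy buf h
    rw [List.all_cons, Bool.and_eq_true] at h
    have hc1 : (c == '[') = false := by rcases h with ⟨h1, _⟩; cases hc : (c == '[') <;> simp_all
    rw [List.foldl_cons]
    show List.foldl stepB (stepB (su, hy, buf, false) c) seg = _
    rw [show stepB (su, hy, buf, false) c = (su, hy, buf ++ [c], false) by simp [stepB, hc1]]
    rw [ih su hy (buf ++ [c]) h.2]
    simp

theorem tokensB_noOpen (cs : List Char) (h : cs.all (fun x => !(x == '[')) = true) :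
    tokensB cs = ([cs], []) := by
  unfold tokensB
  rw [show cs.foldl stepB ([], [], [], false) = ([], [], [] ++ cs, false) from
    foldl_stepB_noOpen cs [] [] [] h]
  simp

theorem foldl_stepB_noClose : ∀ (seg : List Char) (su hy : List (List Char)) (buf : List Char),
    seg.all (fun x => !(x == ']')) = true →
    seg.foldl stepB (su, hy, buf, true) = (su, hy, buf ++ seg, true) := by
  intro seg
  induction seg with
  | nil => intro su hy buf _; simp
  | cons c seg ih =>
    intro su hy buf h
    rw [List.all_cons, Bool.and_eq_true] at h
    have hc2 : (c == ']') = false := by rcases h with ⟨h1, _⟩; cases hc : (c == ']') <;> simp_all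
    rw [List.foldl_cons]
    show List.foldl stepB (stepB (su, hy, buf, true) c) seg = _
    rw [show stepB (su, hy, buf, true) c = (su, hy, buf ++ [c], true) by simp [stepB, hc2]]
    rw [ih su hy (buf ++ [c]) h.2]
    simp

theorem tokensB_decomp (pre mid rest : List Char)
    (hpre : pre.all (fun x => !(x == '[')) = true) (hmid : mid.all (fun x => !(x == ']')) = true) :
    tokensB (pre ++ '[' :: (mid ++ ']' :: rest)) =
      (pre :: (tokensB rest).1, mid :: (tokensB rest).2) := by
  have hf : (pre ++ '[' :: (mid ++ ']' :: rest)).foldl stepB ([], [], [], false) =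
      ([pre] ++ (rest.foldl stepB ([], [], [], false)).1,
       [mid] ++ (rest.foldl stepB ([], [], [], false)).2.1,
       (rest.foldl stepB ([], [], [], false)).2.2.1,
       (rest.foldl stepB ([], [], [], false)).2.2.2) := by
    rw [List.foldl_append, foldl_stepB_noOpen pre [] [] [] hpre, List.foldl_cons]
    rw [show stepB ([], [], [] ++ pre, false) '[' = ([[] ++ pre], [], [], true) by simp [stepB]]
    rw [List.foldl_append, foldl_stepB_noClose mid [[] ++ pre] [] [] hmid, List.foldl_cons]
    rw [show stepB ([[] ++ pre], [], [] ++ mid, true) ']' = ([[] ++ pre], [[] ++ mid], [], false) by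
      simp [stepB]]
    simpa using foldl_stepB_pre rest [pre] [mid] [] [] [] false
  unfold tokensB
  rw [hf]
  cases hins : (rest.foldl stepB ([], [], [], false)).2.2.2 <;> simp [hins]

theorem findIdx?_after (p : Char → Bool) :
    ∀ (pre : List Char) (x : Char) (r : List Char), pre.all (fun c => !p c) = true → p x = true →
      List.findIdx? p (pre ++ x :: r) = some pre.length := by
  intro pre
  induction pre with
  | nil => intro x r _ hx; simp [List.findIdx?_cons, hx]
  | cons a pre ih =>
    intro x r h hx
    rw [List.all_cons, Bool.and_eq_true] at h
    have ha : p a = false := by cases hpa : p a <;> simp_all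
    simp [List.findIdx?_cons, ha, ih x r h.2 hx]

theorem diffA_rel_tokensB_aux : ∀ (n : Nat) (cs : List Char), cs.length ≤ n → domOk cs = true →
    ∃ sup hyp, diffA cs = some (sup, hyp) ∧
      sup.any abbaB = (tokensB cs).1.any abbaB ∧
      (hyp.all fun h => !abbaB h) = ((tokensB cs).2.all fun h => !abbaB h) := by
  intro n
  induction n with
  | zero =>
    intro cs hlen _
    have hnil : cs = [] := List.eq_nil_of_length_eq_zero (Nat.le_zero.mp hlen)
    subst hnil
    refine ⟨[[]], [], ?_, by decide, by decide⟩
    rw [diffA.eq_def]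
    simp [List.findIdx?_nil]
  | succ n ih =>
    intro cs hlen hdom
    rcases domOk_decomp cs hdom with hall | ⟨pre, mid, rest, hcs, hpre, hmid⟩
    · have h1 : cs.findIdx? (· == '[') = none := by
        rw [List.findIdx?_eq_none_iff]
        intro x hx
        rw [List.all_eq_true] at hall
        simpa using hall x hx
      have hd : diffA cs = some ([cs], []) := by
        rw [diffA.eq_def]
        split
        · rfl
        · rename_i i heq; rw [h1] at heq; exact absurd heq (by simp)
      exact ⟨[cs], [], hd, by rw [tokensB_noOpen cs hall], by rw [tokensB_noOpen cs hall]⟩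
    · subst hcs
      have h1 : (pre ++ '[' :: (mid ++ ']' :: rest)).findIdx? (· == '[') = some pre.length :=
        findIdx?_after _ pre '[' _ hpre (by decide)
      have htok := tokensB_decomp pre mid rest hpre hmid
      have htake : (pre ++ '[' :: (mid ++ ']' :: rest)).take pre.length = pre := List.take_left
      by_cases hpc : pre.all (fun x => !(x == ']')) = true
      · -- in-order: the first ']' is the one closing the first '['
        have h2 : (pre ++ '[' :: (mid ++ ']' :: rest)).findIdx? (· == ']') =
            some (pre ++ '[' :: mid).length := by
          have hassoc : pre ++ '[' :: (mid ++ ']' :: rest) = (pre ++ '[' :: mid) ++ ']' :: rest := by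
            simp
          rw [hassoc]
          refine findIdx?_after _ (pre ++ '[' :: mid) ']' rest ?_ (by decide)
          rw [List.all_append, List.all_cons]
          simp only [hpc, hmid]
          simp
        have hdrop : (pre ++ '[' :: (mid ++ ']' :: rest)).drop ((pre ++ '[' :: mid).length + 1) = rest := by
          have hx : pre ++ '[' :: (mid ++ ']' :: rest) = ((pre ++ '[' :: mid) ++ [']']) ++ rest := by simp
          rw [hx, show (pre ++ '[' :: mid).length + 1 = ((pre ++ '[' :: mid) ++ [']']).length by
            simp only [List.length_append, List.length_cons, List.length_nil]]
          exact List.drop_left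
        have hlrest : rest.length ≤ n := by
          have := hlen
          simp [List.length_append] at this
          omega
        have hdomrest : domOk rest = true := by
          have hx := domOk_drop ((pre ++ '[' :: mid).length + 1) _ hdom
          rwa [hdrop] at hx
        obtain ⟨supR, hypR, hdR, hs, hh⟩ := ih rest hlrest hdomrest
        have hdrop2 : (pre ++ '[' :: (mid ++ ']' :: rest)).drop (pre.length + 1) = mid ++ ']' :: rest := by
          have hx : pre ++ '[' :: (mid ++ ']' :: rest) = (pre ++ ['[']) ++ (mid ++ ']' :: rest) := by simp
          rw [hx, show pre.length + 1 = (pre ++ ['[']).length by simp]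
          exact List.drop_left
        have hsub : (pre ++ '[' :: mid).length - (pre.length + 1) = mid.length := by
          simp only [List.length_append, List.length_cons]; omega
        have hd : diffA (pre ++ '[' :: (mid ++ ']' :: rest)) = some (pre :: supR, mid :: hypR) := by
          rw [diffA.eq_def]
          split
          · rename_i heq; rw [h1] at heq; exact absurd heq (by simp)
          · rename_i i heq
            rw [h1] at heq
            have hi : i = pre.length := by simpa using heq.symm
            subst hi
            rw [h2]
            dsimp only
            rw [hdrop, hdR, Option.map_some]
            simp only [htake, hdrop2, hsub]
            rw [show (mid ++ ']' :: rest).take mid.length = mid from List.take_left]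
        refine ⟨_, _, hd, ?_, ?_⟩
        · rw [htok]; simp only [List.any_cons, hs]
        · rw [htok]; simp only [List.all_cons, hh]
      · -- out-of-order: a stray ']' inside pre comes first; A cuts there and re-scans part of pre
        have hmem : ']' ∈ pre := by
          simp only [List.all_eq_true, Bool.not_eq_eq_eq_not, Bool.not_true, beq_eq_false_iff_ne,
            not_forall] at hpc
          obtain ⟨x, hx, hxe⟩ := hpc
          simp only [ne_eq, not_not] at hxe
          rwa [hxe] at hx
        obtain ⟨p1, p2, hpre_eq, hp1⟩ := split_first pre ']' hmem
        have hp1o : p1.all (fun c => !(c == '[')) = true := by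
          rw [hpre_eq, List.all_append, List.all_cons, Bool.and_eq_true, Bool.and_eq_true] at hpre
          exact hpre.1
        have hp2o : p2.all (fun c => !(c == '[')) = true := by
          rw [hpre_eq, List.all_append, List.all_cons, Bool.and_eq_true, Bool.and_eq_true] at hpre
          exact hpre.2.2
        have hassoc : pre ++ '[' :: (mid ++ ']' :: rest) =
            p1 ++ ']' :: (p2 ++ '[' :: (mid ++ ']' :: rest)) := by
          rw [hpre_eq]; simp
        have h2 : (pre ++ '[' :: (mid ++ ']' :: rest)).findIdx? (· == ']') = some p1.length := by
          rw [hassoc]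
          exact findIdx?_after _ p1 ']' _ hp1 (by decide)
        have hdrop : (pre ++ '[' :: (mid ++ ']' :: rest)).drop (p1.length + 1) =
            p2 ++ '[' :: (mid ++ ']' :: rest) := by
          rw [hassoc, show p1 ++ ']' :: (p2 ++ '[' :: (mid ++ ']' :: rest)) =
            (p1 ++ [']']) ++ (p2 ++ '[' :: (mid ++ ']' :: rest)) by simp,
            show p1.length + 1 = (p1 ++ [']']).length by simp]
          exact List.drop_left
        have hlen2 : (p2 ++ '[' :: (mid ++ ']' :: rest)).length ≤ n := by
          have hx : (p1 ++ ']' :: (p2 ++ '[' :: (mid ++ ']' :: rest))).length ≤ n + 1 := by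
            rw [← hassoc]; exact hlen
          simp only [List.length_append, List.length_cons] at hx ⊢
          omega
        have hdom2 : domOk (p2 ++ '[' :: (mid ++ ']' :: rest)) = true := by
          have hx := domOk_drop (p1.length + 1) _ hdom
          rwa [hdrop] at hx
        obtain ⟨supR, hypR, hdR, hs, hh⟩ := ih _ hlen2 hdom2
        have hyp0 : p1.length - (pre.length + 1) = 0 := by
          have : p1.length ≤ pre.length := by rw [hpre_eq]; simp
          omega
        have hd : diffA (pre ++ '[' :: (mid ++ ']' :: rest)) = some (pre :: supR, [] :: hypR) := by
          rw [diffA.eq_def]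
          split
          · rename_i heq; rw [h1] at heq; exact absurd heq (by simp)
          · rename_i i heq
            rw [h1] at heq
            have hi : i = pre.length := by simpa using heq.symm
            subst hi
            rw [h2]
            dsimp only
            rw [hdrop, hdR, Option.map_some]
            simp only [htake, hyp0, List.take_zero]
        have htok2 := tokensB_decomp p2 mid rest hp2o hmid
        refine ⟨_, _, hd, ?_, ?_⟩
        · rw [htok]
          simp only [List.any_cons, hs, htok2]
          by_cases hp2 : abbaB p2 = true
          · have hdrop3 : pre.drop (p1.length + 1) = p2 := by
              rw [hpre_eq, show p1 ++ ']' :: p2 = (p1 ++ [']']) ++ p2 by simp,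
                show p1.length + 1 = (p1 ++ [']']).length by simp]
              exact List.drop_left
            have hpreab : abbaB pre = true := abbaB_drop (p1.length + 1) pre (by rwa [hdrop3])
            simp [hpreab]
          · simp [hp2]
        · rw [htok]
          simp only [List.all_cons, hh, htok2]
          simp [show abbaB [] = false from rfl]

theorem valid_body_eq (ip : String) (hip : domOk ip.toList = true) (acc : Int) :
    (match diffA ip.toList with
     | none => acc
     | some sh => if sh.1.any check_abbaA && sh.2.all (fun h => !check_abbaA h) then acc + 1 else acc)
    = (if validB ip then acc + 1 else acc) := by
  obtain ⟨sup, hyp, hd, hsup, hhyp⟩ := diffA_rel_tokensB_aux ip.toList.length ip.toList le_rfl hip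
  rw [hd]
  dsimp only
  have habba : check_abbaA = abbaB := funext abba_eq
  congr 1
  rw [habba, hsup, hhyp]
  simp [validB, List.all_eq_not_any_not]

theorem foldl_count (l : List String) (h : ∀ ip ∈ l, domOk ip.toList = true) (acc : Int) :
    l.foldl (fun acc ip =>
      match diffA ip.toList with
      | none => acc
      | some sh =>
        if sh.1.any check_abbaA && sh.2.all (fun h => !check_abbaA h) then acc + 1 else acc) acc
    = acc + ((l.countP validB : Nat) : Int) := by
  induction l generalizing acc with
  | nil => simp
  | cons ip t iht =>
    have hip := h ip (by simp)
    have ht : ∀ x ∈ t, domOk x.toList = true := fun x hx => h x (List.mem_cons_of_mem _ hx)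
    rw [List.foldl_cons]
    show t.foldl _ (match diffA ip.toList with
      | none => acc
      | some sh =>
        if sh.1.any check_abbaA && sh.2.all (fun h => !check_abbaA h) then acc + 1 else acc) = _
    rw [valid_body_eq ip hip acc, iht ht]
    by_cases hv : validB ip = true <;> simp [hv] <;> ring

-- ===== VERDICT (by name: the statement is the Claim_ definition above) =====
theorem part_1_spec : Claim_equal_part_1 := by
  intro l _ hpre
  unfold Spec_part_1 part_1 part_1_alt
  have h : ∀ ip ∈ l, domOk ip.toList = true := by
    unfold Pre_part_1 at hpre
    rw [List.all_eq_true] at hpre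
    exact fun ip hip => hpre ip hip
  simpa using foldl_count l h 0
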